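-- pv_equiv track=rewrite | github.com/nirvan840/CAPTCHA_Precog-IITH | task2_generation/dataset_character.py | _merge_adjacent_boxes
-- ===== SOURCE A (Python) =====
-- def _merge_adjacent_boxes(boxes, max_gap=2):
--     """
--     boxes must be left-to-right sorted.
--     Any two consecutive boxes whose horizontal gap ≤ max_gap pixels
--     are merged into one (x,0,w,fullH) box.
--     """
--     if not boxes:
--         return []
--
--     merged = [list(boxes[0])]          # start with first box as [x,0,w,H]
--     for x, y, w, h in boxes[1:]:
--         prev_x, _, prev_w, _ = merged[-1]
--         gap = x - (prev_x + prev_w)    # horizontal space between boxes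
--
--         if gap <= max_gap:             # blobs touch / nearly touch → same char
--             # extend the previous box to include this one
--             new_right = max(prev_x + prev_w, x + w)
--             merged[-1][2] = new_right - prev_x
--         else:
--             merged.append([x, y, w, h])
--
--     return [tuple(b) for b in merged]
-- ===== SOURCE B (Python) =====
-- def _merge_adjacent_boxes(boxes, max_gap=2):
--     # Two-phase: first partition boxes into groups by the gap test against the
--     # running rightmost edge, then collapse each group to a single box.
--     groups = []
--     cur = []
--     right = None
--     for b in boxes:
--         x, y, w, h = b
--         if cur and x - right > max_gap:
--             groups.append(cur)
--             cur = [b]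
--             right = x + w
--         else:
--             cur.append(b)
--             right = x + w if right is None else max(right, x + w)
--     if cur:
--         groups.append(cur)
--     return [(g[0][0], g[0][1], max(x + w for x, y, w, h in g) - g[0][0], g[0][3])
--             for g in groups]
-- ===== Notes on version B (the rewrite author's own statement) =====
-- stated objective: alternative
-- what changed: B splits the work into two passes: one that partitions the boxes into groups using the running rightmost edge, and one that collapses each group to (first.x, first.y, max(x+w) - first.x, first.h), instead of A's single pass that mutates the width of the last merged box in place.
import Mathlib
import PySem

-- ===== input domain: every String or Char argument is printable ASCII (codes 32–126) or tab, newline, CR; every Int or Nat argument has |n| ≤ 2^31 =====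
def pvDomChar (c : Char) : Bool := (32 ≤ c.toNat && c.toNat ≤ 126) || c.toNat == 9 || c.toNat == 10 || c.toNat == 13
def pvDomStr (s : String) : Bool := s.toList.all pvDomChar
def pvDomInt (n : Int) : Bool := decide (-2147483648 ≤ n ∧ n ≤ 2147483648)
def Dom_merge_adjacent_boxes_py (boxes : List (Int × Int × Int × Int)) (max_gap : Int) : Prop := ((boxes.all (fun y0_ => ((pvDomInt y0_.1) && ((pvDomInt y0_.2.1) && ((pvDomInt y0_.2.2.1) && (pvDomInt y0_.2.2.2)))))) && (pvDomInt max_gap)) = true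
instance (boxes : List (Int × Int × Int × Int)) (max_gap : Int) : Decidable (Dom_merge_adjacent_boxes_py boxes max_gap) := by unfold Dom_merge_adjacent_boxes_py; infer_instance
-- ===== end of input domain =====

-- B replaces A's single pass that widens the last merged box in place by a
-- two-pass split: partition into groups by the gap test, then collapse each
-- group to one box (objective: alternative decomposition, same cost).

-- ===== PORT A =====
-- A mutates merged[-1]; the port keeps `merged` REVERSED so the mutable last
-- element is the head, and reverses at the end.
def pvStepA (g : Int) (acc : List (Int × Int × Int × Int)) (b : Int × Int × Int × Int) :
    List (Int × Int × Int × Int) :=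
  match acc with
  | [] => [b]
  | (px, py, pw, ph) :: rest =>
    let gap := b.1 - (px + pw)
    if gap ≤ g then
      let new_right := max (px + pw) (b.1 + b.2.2.1)
      (px, py, new_right - px, ph) :: rest
    else
      b :: (px, py, pw, ph) :: rest

def merge_adjacent_boxes_py (boxes : List (Int × Int × Int × Int)) (max_gap : Int) :
    List (Int × Int × Int × Int) :=
  match boxes with
  | [] => []
  | b0 :: rest => (rest.foldl (pvStepA max_gap) [b0]).reverse

-- ===== PORT B =====
def pvRightOf (b : Int × Int × Int × Int) : Int := b.1 + b.2.2.1

-- max(x+w for x,y,w,h in g) over a nonempty group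
def pvGroupRight (g : List (Int × Int × Int × Int)) : Int :=
  match g with
  | [] => 0
  | b :: t => t.foldl (fun m c => max m (pvRightOf c)) (pvRightOf b)

def pvCollapse (g : List (Int × Int × Int × Int)) : Int × Int × Int × Int :=
  match g with
  | [] => (0, 0, 0, 0)
  | b :: t => (b.1, b.2.1, pvGroupRight (b :: t) - b.1, b.2.2.2)

def pvStepB (gp : Int) (st : List (List (Int × Int × Int × Int)) × List (Int × Int × Int × Int) × Int)
    (b : Int × Int × Int × Int) :
    List (List (Int × Int × Int × Int)) × List (Int × Int × Int × Int) × Int :=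
  match st with
  | (groups, cur, right) =>
    match cur with
    | [] => (groups, [b], pvRightOf b)          -- `right is None` branch
    | _ =>
      if b.1 - right > gp then (groups ++ [cur], [b], pvRightOf b)
      else (groups, cur ++ [b], max right (pvRightOf b))

def merge_adjacent_boxes_py_alt (boxes : List (Int × Int × Int × Int)) (max_gap : Int) :
    List (Int × Int × Int × Int) :=
  let st := boxes.foldl (pvStepB max_gap) ([], [], 0)
  let groups := if st.2.1 = [] then st.1 else st.1 ++ [st.2.1]
  groups.map pvCollapse

-- ===== PRECONDITION & SPEC =====
def Spec_merge_adjacent_boxes_py (boxes : List (Int × Int × Int × Int)) (max_gap : Int) (out : List (Int × Int × Int × Int)) : Prop := out = merge_adjacent_boxes_py_alt boxes max_gap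
instance (boxes : List (Int × Int × Int × Int)) (max_gap : Int) (out : List (Int × Int × Int × Int)) : Decidable (Spec_merge_adjacent_boxes_py boxes max_gap out) := by unfold Spec_merge_adjacent_boxes_py; infer_instance

-- ===== CLAIM (what is proved, stated in full; the proofs are below) =====
def Claim_equal_merge_adjacent_boxes_py : Prop := ∀ (boxes : List (Int × Int × Int × Int)) (max_gap : Int), Dom_merge_adjacent_boxes_py boxes max_gap → Spec_merge_adjacent_boxes_py boxes max_gap (merge_adjacent_boxes_py boxes max_gap)

-- ===== LEMMAS AND PROOFS =====

-- the head of A's reversed accumulator while the current group is `cur` with running right edge `right`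
def pvHd (cur : List (Int × Int × Int × Int)) (right : Int) : Int × Int × Int × Int :=
  match cur with
  | [] => (0, 0, 0, 0)
  | (x, y, _, h) :: _ => (x, y, right - x, h)

lemma pvGroupRight_append (c0 : Int × Int × Int × Int) (t : List (Int × Int × Int × Int))
    (b : Int × Int × Int × Int) :
    pvGroupRight ((c0 :: t) ++ [b]) = max (pvGroupRight (c0 :: t)) (pvRightOf b) := by
  simp [pvGroupRight, List.foldl_append]

lemma pvCollapse_eq (cur : List (Int × Int × Int × Int)) (h : cur ≠ []) :
    pvCollapse cur = pvHd cur (pvGroupRight cur) := by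
  match cur with
  | [] => exact absurd rfl h
  | b :: t => simp [pvCollapse, pvHd]

lemma pvInv (gp : Int) (rest : List (Int × Int × Int × Int)) :
    ∀ (groups : List (List (Int × Int × Int × Int))) (cur : List (Int × Int × Int × Int)) (right : Int),
    cur ≠ [] → right = pvGroupRight cur →
    (rest.foldl (pvStepB gp) (groups, cur, right)).2.1 ≠ [] ∧
    (rest.foldl (pvStepB gp) (groups, cur, right)).2.2 =
      pvGroupRight (rest.foldl (pvStepB gp) (groups, cur, right)).2.1 ∧
    (rest.foldl (pvStepA gp) (pvHd cur right :: (groups.map pvCollapse).reverse)).reverse =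
      ((rest.foldl (pvStepB gp) (groups, cur, right)).1 ++
        [(rest.foldl (pvStepB gp) (groups, cur, right)).2.1]).map pvCollapse := by
  induction rest with
  | nil =>
    intro groups cur right hne hr
    refine ⟨hne, hr, ?_⟩
    simp [List.map_append, ← pvCollapse_eq cur hne, hr]
  | cons b rest ih =>
    intro groups cur right hne hr
    match cur, hne with
    | (cx, cy, cw, ch) :: ctail, _ =>
      by_cases hgap : b.1 - right > gp
      · have hA : pvStepA gp (pvHd ((cx, cy, cw, ch) :: ctail) right :: (groups.map pvCollapse).reverse) b
            = pvHd [b] (pvRightOf b) :: ((groups ++ [(cx, cy, cw, ch) :: ctail]).map pvCollapse).reverse := by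
          obtain ⟨bx, by_, bw, bh⟩ := b
          have hcond : ¬ (bx ≤ gp + right) := by omega
          simp [pvStepA, pvHd, pvRightOf, hcond,
            pvCollapse_eq _ (by simp : ((cx, cy, cw, ch) :: ctail) ≠ []), ← hr]
        have hB : pvStepB gp (groups, (cx, cy, cw, ch) :: ctail, right) b
            = (groups ++ [(cx, cy, cw, ch) :: ctail], [b], pvRightOf b) := by
          simp [pvStepB, hgap]
        simp only [List.foldl_cons, hA, hB]
        exact ih _ [b] (pvRightOf b) (by simp) (by simp [pvGroupRight])
      · have hA : pvStepA gp (pvHd ((cx, cy, cw, ch) :: ctail) right :: (groups.map pvCollapse).reverse) b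
            = pvHd (((cx, cy, cw, ch) :: ctail) ++ [b]) (max right (pvRightOf b)) :: (groups.map pvCollapse).reverse := by
          obtain ⟨bx, by_, bw, bh⟩ := b
          have hcond : bx ≤ gp + right := by omega
          simp [pvStepA, pvHd, pvRightOf, hcond]
        have hB : pvStepB gp (groups, (cx, cy, cw, ch) :: ctail, right) b
            = (groups, ((cx, cy, cw, ch) :: ctail) ++ [b], max right (pvRightOf b)) := by
          simp [pvStepB, hgap]
        simp only [List.foldl_cons, hA, hB]
        exact ih _ _ _ (by simp) (by rw [pvGroupRight_append, hr])

-- ===== VERDICT (by name: the statement is the Claim_ definition above) =====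
theorem merge_adjacent_boxes_py_spec : Claim_equal_merge_adjacent_boxes_py := by
  intro boxes max_gap _
  unfold Spec_merge_adjacent_boxes_py
  match boxes with
  | [] => rfl
  | b0 :: rest =>
    obtain ⟨x, y, w, h⟩ := b0
    have hstep : pvStepB max_gap ([], [], 0) (x, y, w, h) = ([], [(x, y, w, h)], pvRightOf (x, y, w, h)) := by
      simp [pvStepB]
    have := pvInv max_gap rest [] [(x, y, w, h)] (pvRightOf (x, y, w, h)) (by simp) (by simp [pvGroupRight])
    obtain ⟨hne, _, heq⟩ := this
    have hacc : pvHd [(x, y, w, h)] (pvRightOf (x, y, w, h)) :: (List.map pvCollapse []).reverse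
        = [(x, y, w, h)] := by simp [pvHd, pvRightOf]
    rw [hacc] at heq
    unfold merge_adjacent_boxes_py merge_adjacent_boxes_py_alt
    simp only [List.foldl_cons, hstep]
    rw [if_neg hne]
    exact heq
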